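-- pv_equiv track=rewrite | github.com/UIUC-ESDL/SPI2py | src/SPI2py/API/Components.py | _get_sphere_indices
-- ===== SOURCE A (Python) =====
-- def _get_sphere_indices(n_spheres):
--     # FIXME (-1,3) not (-1, 1)?
--
--     indices_spheres = []
--     i = 0
--     for n_sphere in n_spheres:
--         n_variables = 3 * n_sphere  # 3 for x, y, z
--         indices_component_spheres = [j for j in range(i, i + n_variables)]
--         indices_spheres.append(indices_component_spheres)
--         i += n_sphere
--
--     indices_radii = []
--     i = 0
--     for n_sphere in n_spheres:
--         n_variables = n_sphere  # 1 for radius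
--         indices_component_radii = [j for j in range(i, i + n_variables)]
--         indices_radii.append(indices_component_radii)
--         i += n_sphere
--
--     return indices_spheres, indices_radii
-- ===== SOURCE B (Python) =====
-- def _get_sphere_indices(n_spheres):
--     # One recursive pass over the list that builds BOTH index lists at once
--     # (A makes two separate left-to-right accumulator loops). The recursion
--     # carries the current offset and assembles the results back-to-front.
--     def go(i, rest):
--         if not rest:
--             return [], []
--         n = rest[0]
--         spheres_tail, radii_tail = go(i + n, rest[1:])
--         return ([list(range(i, i + 3 * n))] + spheres_tail,
--                 [list(range(i, i + n))] + radii_tail)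
--     return go(0, list(n_spheres))
-- ===== Notes on version B (the rewrite author's own statement) =====
-- stated objective: alternative
-- what changed: Replaces A's two sequential stateful accumulator loops by one recursive pass that carries the offset and constructs both index lists simultaneously, assembling results back-to-front.
import Mathlib
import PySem

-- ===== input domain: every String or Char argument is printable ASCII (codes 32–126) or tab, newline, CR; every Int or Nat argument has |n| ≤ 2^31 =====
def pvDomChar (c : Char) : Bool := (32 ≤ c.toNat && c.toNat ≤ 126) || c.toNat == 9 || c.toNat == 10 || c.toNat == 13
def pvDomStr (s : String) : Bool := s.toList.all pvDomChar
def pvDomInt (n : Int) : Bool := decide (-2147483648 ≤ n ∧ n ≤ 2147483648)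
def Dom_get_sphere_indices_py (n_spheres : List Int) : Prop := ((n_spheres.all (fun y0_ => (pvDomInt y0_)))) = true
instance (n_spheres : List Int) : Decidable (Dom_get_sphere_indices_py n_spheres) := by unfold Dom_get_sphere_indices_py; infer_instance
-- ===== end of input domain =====

-- B replaces A's two sequential stateful accumulator loops by one recursive pass
-- that carries the offset and builds both index lists simultaneously (alternative; same cost).

-- ===== PORT A =====
def get_sphere_indices_py (n_spheres : List Int) : List (List Int) × List (List Int) :=
  -- first loop: indices_spheres, running counter i stepped by n_sphere
  let s := n_spheres.foldl
    (fun (st : List (List Int) × Int) n_sphere =>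
      let n_variables := 3 * n_sphere
      (st.1 ++ [PySem.List.pyRange st.2 (st.2 + n_variables) 1], st.2 + n_sphere))
    ([], 0)
  -- second loop: indices_radii, counter reset to 0
  let r := n_spheres.foldl
    (fun (st : List (List Int) × Int) n_sphere =>
      let n_variables := n_sphere
      (st.1 ++ [PySem.List.pyRange st.2 (st.2 + n_variables) 1], st.2 + n_sphere))
    ([], 0)
  (s.1, r.1)

-- ===== PORT B =====
-- def go(i, rest): one recursion building both lists back-to-front
def pvGoB (i : Int) : List Int → List (List Int) × List (List Int)
  | [] => ([], [])
  | n :: rest =>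
    let tails := pvGoB (i + n) rest
    (PySem.List.pyRange i (i + 3 * n) 1 :: tails.1,
     PySem.List.pyRange i (i + n) 1 :: tails.2)

def get_sphere_indices_py_alt (n_spheres : List Int) : List (List Int) × List (List Int) :=
  pvGoB 0 n_spheres

-- ===== PRECONDITION & SPEC =====
def Spec_get_sphere_indices_py (n_spheres : List Int) (out : List (List Int) × List (List Int)) : Prop := out = get_sphere_indices_py_alt n_spheres
instance (n_spheres : List Int) (out : List (List Int) × List (List Int)) : Decidable (Spec_get_sphere_indices_py n_spheres out) := by unfold Spec_get_sphere_indices_py; infer_instance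

-- ===== CLAIM (what is proved, stated in full; the proofs are below) =====
def Claim_equal_get_sphere_indices_py : Prop := ∀ (n_spheres : List Int), Dom_get_sphere_indices_py n_spheres → Spec_get_sphere_indices_py n_spheres (get_sphere_indices_py n_spheres)

-- ===== LEMMAS AND PROOFS =====

-- A's accumulator loop with width f appends exactly the corresponding component of B's recursion
theorem pvA_loop_fst (ns : List Int) : ∀ (acc : List (List Int)) (i : Int),
    (ns.foldl (fun (st : List (List Int) × Int) n =>
      (st.1 ++ [PySem.List.pyRange st.2 (st.2 + 3 * n) 1], st.2 + n)) (acc, i)).1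
    = acc ++ (pvGoB i ns).1 := by
  induction ns with
  | nil => intro acc i; simp [pvGoB]
  | cons n t ih => intro acc i; simp [List.foldl, ih, pvGoB]

theorem pvA_loop_snd (ns : List Int) : ∀ (acc : List (List Int)) (i : Int),
    (ns.foldl (fun (st : List (List Int) × Int) n =>
      (st.1 ++ [PySem.List.pyRange st.2 (st.2 + n) 1], st.2 + n)) (acc, i)).1
    = acc ++ (pvGoB i ns).2 := by
  induction ns with
  | nil => intro acc i; simp [pvGoB]
  | cons n t ih => intro acc i; simp [List.foldl, ih, pvGoB]

-- ===== VERDICT (by name: the statement is the Claim_ definition above) =====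
theorem get_sphere_indices_py_spec : Claim_equal_get_sphere_indices_py := by
  intro ns _
  unfold Spec_get_sphere_indices_py get_sphere_indices_py get_sphere_indices_py_alt
  simp only []
  rw [pvA_loop_fst ns [] 0, pvA_loop_snd ns [] 0]
  simp
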